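-- pv_equiv track=rewrite | github.com/DeCooper88/AOC2020 | AOC20_16.py | possible_fields_for_row
-- ===== SOURCE A (Python) =====
-- from typing import Dict, List, Set
--
-- def possible_fields_for_row(row: List, fields: Dict):
--     """Return list of data_fields that row is valid for."""
--     valid_fields = []
--     for field, ranges in fields.items():
--         all_valid = True
--         for num in row:
--             found = 0
--             for ran in ranges:
--                 low, high = ran
--                 if low <= num <= high:
--                     found += 1
--             if found == 0:
--                 all_valid = False
--                 break
--         if all_valid:
--             valid_fields.append(field)
--     return valid_fields
-- ===== SOURCE B (Python) =====
-- def possible_fields_for_row(row, fields):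
--     """Return list of data_fields that row is valid for."""
--     candidates = list(fields.items())
--     for num in row:
--         candidates = [(f, rs) for f, rs in candidates
--                       if any(low <= num <= high for low, high in rs)]
--     return [f for f, _ in candidates]
-- ===== Notes on version B (the rewrite author's own statement) =====
-- stated objective: alternative
-- what changed: B inverts the loop nesting: instead of checking every number per field, it makes one pass over the row's numbers, narrowing a candidate list of (field, ranges) entries by filtering out entries with no range covering the current number, then returns the surviving field names.
import Mathlib
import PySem

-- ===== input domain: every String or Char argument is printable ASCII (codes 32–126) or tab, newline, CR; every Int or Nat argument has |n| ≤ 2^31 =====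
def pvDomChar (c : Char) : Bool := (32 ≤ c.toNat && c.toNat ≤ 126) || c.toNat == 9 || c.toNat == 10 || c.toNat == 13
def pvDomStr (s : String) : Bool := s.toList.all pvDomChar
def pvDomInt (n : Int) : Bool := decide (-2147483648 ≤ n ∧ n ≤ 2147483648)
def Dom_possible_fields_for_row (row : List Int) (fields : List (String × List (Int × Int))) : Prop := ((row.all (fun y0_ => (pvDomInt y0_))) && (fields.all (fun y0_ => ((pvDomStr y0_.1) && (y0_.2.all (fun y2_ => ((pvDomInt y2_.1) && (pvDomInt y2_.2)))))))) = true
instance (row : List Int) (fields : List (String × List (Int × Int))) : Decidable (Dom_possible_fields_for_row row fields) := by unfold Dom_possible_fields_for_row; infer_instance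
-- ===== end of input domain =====

-- B inverts the loop nesting (one pass over the row's numbers filtering a candidate list) instead of checking each field against every number; same cost, different decomposition.


-- ===== PORT A =====
-- 'found = 0; for ran in ranges: … found += 1'
def pvFoundA (num : Int) (ranges : List (Int × Int)) : Int :=
  ranges.foldl (fun found ran => if ran.1 ≤ num ∧ num ≤ ran.2 then found + 1 else found) 0

-- 'all_valid = True; for num in row: … if found == 0: all_valid = False; break'
def pvAllValidA (row : List Int) (ranges : List (Int × Int)) : Bool :=
  match row with
  | [] => true
  | num :: rest => if pvFoundA num ranges = 0 then false else pvAllValidA rest ranges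

def possible_fields_for_row (row : List Int) (fields : List (String × List (Int × Int))) : List String :=
  fields.foldl (fun valid_fields p => if pvAllValidA row p.2 then valid_fields ++ [p.1] else valid_fields) []

-- ===== PORT B =====
-- 'any(low <= num <= high for low, high in rs)'
def pvAcceptsB (num : Int) (rs : List (Int × Int)) : Bool :=
  rs.any (fun r => decide (r.1 ≤ num ∧ num ≤ r.2))

def possible_fields_for_row_alt (row : List Int) (fields : List (String × List (Int × Int))) : List String :=
  (row.foldl (fun candidates num => candidates.filter (fun p => pvAcceptsB num p.2)) fields).map (fun p => p.1)

-- ===== PRECONDITION & SPEC =====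
def Spec_possible_fields_for_row (row : List Int) (fields : List (String × List (Int × Int))) (out : List String) : Prop := out = possible_fields_for_row_alt row fields
instance (row : List Int) (fields : List (String × List (Int × Int))) (out : List String) : Decidable (Spec_possible_fields_for_row row fields out) := by unfold Spec_possible_fields_for_row; infer_instance

-- ===== CLAIM (what is proved, stated in full; the proofs are below) =====
def Claim_equal_possible_fields_for_row : Prop := ∀ (row : List Int) (fields : List (String × List (Int × Int))), Dom_possible_fields_for_row row fields → Spec_possible_fields_for_row row fields (possible_fields_for_row row fields)

-- ===== LEMMAS AND PROOFS =====

-- A's count is zero exactly when no range accepts the number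
theorem pvFoundA_eq_zero (num : Int) (rs : List (Int × Int)) :
    (pvFoundA num rs = 0) ↔ (pvAcceptsB num rs = false) := by
  have h : ∀ (l : List (Int × Int)) (c : Int), 0 ≤ c →
      (l.foldl (fun found ran => if ran.1 ≤ num ∧ num ≤ ran.2 then found + 1 else found) c = 0
        ↔ c = 0 ∧ l.any (fun r => decide (r.1 ≤ num ∧ num ≤ r.2)) = false) := by
    intro l
    induction l with
    | nil => intro c hc; simp
    | cons r t ih =>
      intro c hc
      simp only [List.foldl_cons, List.any_cons]
      by_cases hr : r.1 ≤ num ∧ num ≤ r.2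
      · rw [if_pos hr, ih (c + 1) (by omega)]
        simp [hr]; omega
      · rw [if_neg hr, ih c hc]
        simp [hr]
  have := h rs 0 le_rfl
  unfold pvFoundA pvAcceptsB
  simpa using this

-- A's per-field check equals "every number of the row is accepted"
theorem pvAllValidA_eq_all (row : List Int) (rs : List (Int × Int)) :
    pvAllValidA row rs = row.all (fun num => pvAcceptsB num rs) := by
  induction row with
  | nil => rfl
  | cons num rest ih =>
    unfold pvAllValidA
    by_cases h : pvFoundA num rs = 0
    · rw [if_pos h]
      have := (pvFoundA_eq_zero num rs).mp h
      simp [List.all_cons, this]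
    · rw [if_neg h]
      have hacc : pvAcceptsB num rs = true := by
        cases hb : pvAcceptsB num rs
        · exact absurd ((pvFoundA_eq_zero num rs).mpr hb) h
        · rfl
      simp [List.all_cons, hacc, ih]

-- B's repeated filtering over the row equals one filter by the conjunction of all tests
theorem foldl_filter_eq_filter_all (row : List Int) (fields : List (String × List (Int × Int))) :
    row.foldl (fun candidates num => candidates.filter (fun p => pvAcceptsB num p.2)) fields
      = fields.filter (fun p => row.all (fun num => pvAcceptsB num p.2)) := by
  induction row generalizing fields with
  | nil => simp
  | cons num rest ih =>
    rw [List.foldl_cons, ih, List.filter_filter]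
    congr 1
    funext p
    simp [List.all_cons, Bool.and_comm]

-- ===== VERDICT (by name: the statement is the Claim_ definition above) =====
theorem possible_fields_for_row_spec : Claim_equal_possible_fields_for_row := by
  intro row fields _
  unfold Spec_possible_fields_for_row possible_fields_for_row possible_fields_for_row_alt
  rw [foldl_filter_eq_filter_all]
  rw [PySem.List.foldl_append_if (p := fun p : String × List (Int × Int) => pvAllValidA row p.2)
    (f := fun p => p.1)]
  simp only [List.nil_append]
  have : (fun p : String × List (Int × Int) => pvAllValidA row p.2)
      = fun p => row.all fun num => pvAcceptsB num p.2 := by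
    funext p; exact pvAllValidA_eq_all row p.2
  rw [this]
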